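-- pv_equiv track=rewrite | github.com/yummydum/ccg2lambda | scripts/coq_analyzer.py | find_final_subgoal_line_index
-- ===== SOURCE A (Python) =====
-- def find_final_subgoal_line_index(coq_output_lines):
--     indices = [
--         i for i, line in enumerate(coq_output_lines)
--         if line.endswith('subgoal')
--     ]
--     if not indices:
--         return None
--     return indices[-1]
-- ===== SOURCE B (Python) =====
-- def find_final_subgoal_line_index(coq_output_lines):
--     for i in range(len(coq_output_lines) - 1, -1, -1):
--         if coq_output_lines[i].endswith('subgoal'):
--             return i
--     return None
-- ===== Notes on version B (the rewrite author's own statement) =====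
-- stated objective: simpler
-- what changed: Instead of materialising the full list of matching indices and taking its last element, B scans the list backward from the end and returns the first matching index immediately (early exit), or None when the loop finishes.
import Mathlib
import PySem

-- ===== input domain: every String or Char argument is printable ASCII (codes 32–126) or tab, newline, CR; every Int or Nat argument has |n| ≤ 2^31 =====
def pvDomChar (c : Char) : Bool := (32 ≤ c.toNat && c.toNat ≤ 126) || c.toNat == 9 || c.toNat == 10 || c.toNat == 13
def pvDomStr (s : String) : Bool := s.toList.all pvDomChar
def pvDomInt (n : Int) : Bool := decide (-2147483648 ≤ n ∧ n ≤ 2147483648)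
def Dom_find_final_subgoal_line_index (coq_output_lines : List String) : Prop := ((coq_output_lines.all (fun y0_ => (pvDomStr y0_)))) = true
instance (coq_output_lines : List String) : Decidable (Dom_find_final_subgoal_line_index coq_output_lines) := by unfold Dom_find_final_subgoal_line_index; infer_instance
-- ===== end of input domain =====

-- B replaces A's forward pass that collects all matching indices with a backward scan
-- returning the first (i.e. last) matching index early; same return value, simpler shape.


-- ===== PORT A =====
-- list comprehension over enumerate → filterMap over PySem.List.enumerate
def find_final_subgoal_line_index (coq_output_lines : List String) : Option Int :=
  let indices := (PySem.List.enumerate coq_output_lines).filterMap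
    (fun p => if PySem.Str.endswith p.2 "subgoal" then some p.1 else none)
  if indices.isEmpty then none
  else indices.getLast?

-- ===== PORT B =====
-- B scans backward: `for i in range(len(lines)-1, -1, -1)` with early return;
-- lines[i] with 0 ≤ i < len is exact as pyGetD.
def pvAltGo (coq_output_lines : List String) : Nat → Option Int
  | 0 => none
  | n + 1 =>
      if PySem.Str.endswith (PySem.List.pyGetD coq_output_lines (n : Int) "") "subgoal" then
        some (n : Int)
      else pvAltGo coq_output_lines n

def find_final_subgoal_line_index_alt (coq_output_lines : List String) : Option Int :=
  pvAltGo coq_output_lines coq_output_lines.length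

-- ===== PRECONDITION & SPEC =====
def Spec_find_final_subgoal_line_index (coq_output_lines : List String) (out : Option Int) : Prop := out = find_final_subgoal_line_index_alt coq_output_lines
instance (coq_output_lines : List String) (out : Option Int) : Decidable (Spec_find_final_subgoal_line_index coq_output_lines out) := by unfold Spec_find_final_subgoal_line_index; infer_instance

-- ===== CLAIM (what is proved, stated in full; the proofs are below) =====
def Claim_equal_find_final_subgoal_line_index : Prop := ∀ (coq_output_lines : List String), Dom_find_final_subgoal_line_index coq_output_lines → Spec_find_final_subgoal_line_index coq_output_lines (find_final_subgoal_line_index coq_output_lines)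

-- ===== LEMMAS AND PROOFS =====

-- structural description of A's index list, with explicit start offset
def pvIdxList (lines : List String) (s : Int) : List Int :=
  match lines with
  | [] => []
  | x :: xs => (if PySem.Str.endswith x "subgoal" then [s] else []) ++ pvIdxList xs (s + 1)

theorem pvIdxList_eq_filterMap (lines : List String) (s : Int) :
    (PySem.List.enumerate lines s).filterMap
      (fun p => if PySem.Str.endswith p.2 "subgoal" then some p.1 else none)
      = pvIdxList lines s := by
  induction lines generalizing s with
  | nil => simp [pvIdxList, PySem.List.enumerate_nil]
  | cons x xs ih =>
      by_cases hp : PySem.Str.endswith x "subgoal"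
      · simp only [PySem.List.enumerate_cons, List.filterMap_cons, pvIdxList, if_pos hp, ih,
          List.singleton_append]
      · simp only [PySem.List.enumerate_cons, List.filterMap_cons, pvIdxList, if_neg hp, ih,
          List.nil_append]

theorem pvIdxList_append (lines : List String) (x : String) (s : Int) :
    pvIdxList (lines ++ [x]) s
      = pvIdxList lines s ++ (if PySem.Str.endswith x "subgoal" then [s + lines.length] else []) := by
  induction lines generalizing s with
  | nil => simp [pvIdxList]
  | cons y ys ih =>
      simp only [List.cons_append, pvIdxList, ih, List.length_cons, List.append_assoc]
      push_cast
      ring_nf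

theorem pvAltGo_append (lines : List String) (x : String) (i : Nat) (h : i ≤ lines.length) :
    pvAltGo (lines ++ [x]) i = pvAltGo lines i := by
  induction i with
  | zero => rfl
  | succ n ih =>
      have hn : n < lines.length := h
      have hg : PySem.List.pyGetD (lines ++ [x]) (n : Int) ""
          = PySem.List.pyGetD lines (n : Int) "" := by
        simp [PySem.List.pyGetD_natCast, List.getD, List.getElem?_append_left hn]
      simp [pvAltGo, hg, ih (Nat.le_of_lt hn)]

theorem pvAltGo_eq_getLast (lines : List String) :
    pvAltGo lines lines.length = (pvIdxList lines 0).getLast? := by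
  induction lines using List.reverseRecOn with
  | nil => simp [pvAltGo, pvIdxList]
  | append_singleton ys x ih =>
      have hx : PySem.List.pyGetD (ys ++ [x]) ((ys.length : Int)) "" = x := by
        simp [PySem.List.pyGetD_natCast, List.getD]
      simp only [List.length_append, List.length_cons, List.length_nil, Nat.zero_add,
        pvAltGo, hx, pvIdxList_append, Int.zero_add,
        pvAltGo_append ys x ys.length (le_refl _), ih]
      split
      · simp
      · simp

-- ===== VERDICT (by name: the statement is the Claim_ definition above) =====
theorem find_final_subgoal_line_index_spec : Claim_equal_find_final_subgoal_line_index := by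
  intro lines _
  show find_final_subgoal_line_index lines = find_final_subgoal_line_index_alt lines
  unfold find_final_subgoal_line_index find_final_subgoal_line_index_alt
  rw [pvIdxList_eq_filterMap, pvAltGo_eq_getLast]
  by_cases h : (pvIdxList lines 0).isEmpty
  · simp_all [List.isEmpty_iff]
  · simp [h]
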